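-- pv_equiv track=rewrite | github.com/cvelazquezr/library-naturalness | analyse_dependencies.py | found_match_update
-- ===== SOURCE A (Python) =====
-- def found_match_update(library: str, list_libraries: list):
--     updated_libraries = list()
--     group_artifact = "|".join(library.split("|")[:2])
--
--     for lib in list_libraries:
--         if lib.startswith(group_artifact):
--             updated_libraries.append(lib)
--
--     if not len(updated_libraries):
--         group = library.split("|")[0]
--
--         for lib in list_libraries:
--             if lib.startswith(group):
--                 updated_libraries.append(lib)
--
--     return updated_libraries
-- ===== SOURCE B (Python) =====
-- def found_match_update(library: str, list_libraries: list):
--     parts = library.split("|")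
--     group_artifact = "|".join(parts[:2])
--     group = parts[0]
--     primary = []
--     fallback = []
--     for lib in list_libraries:
--         if lib.startswith(group_artifact):
--             primary.append(lib)
--         if lib.startswith(group):
--             fallback.append(lib)
--     return primary if primary else fallback
-- ===== Notes on version B (the rewrite author's own statement) =====
-- stated objective: alternative
-- what changed: Single pass over list_libraries maintaining two accumulators (matches of the group|artifact prefix and of the group prefix), picking the fallback list only at the end, instead of A's two sequential scans.
import Mathlib
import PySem

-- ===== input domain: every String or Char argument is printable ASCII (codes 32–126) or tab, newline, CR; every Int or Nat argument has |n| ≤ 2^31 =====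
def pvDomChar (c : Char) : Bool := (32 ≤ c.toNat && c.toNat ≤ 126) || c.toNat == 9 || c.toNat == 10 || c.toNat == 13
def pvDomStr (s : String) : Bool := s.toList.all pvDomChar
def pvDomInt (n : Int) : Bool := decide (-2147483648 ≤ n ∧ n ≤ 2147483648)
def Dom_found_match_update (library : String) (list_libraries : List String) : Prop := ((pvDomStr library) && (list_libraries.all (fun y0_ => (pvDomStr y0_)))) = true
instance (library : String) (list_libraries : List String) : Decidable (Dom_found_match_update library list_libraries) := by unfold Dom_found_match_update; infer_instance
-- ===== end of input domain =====

-- ===== PORT A =====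
-- One-line objective: B makes a single pass with two accumulators instead of A's two sequential scans.
def found_match_update (library : String) (list_libraries : List String) : List String :=
  let group_artifact := PySem.Str.join "|" (PySem.List.slice (((PySem.Str.split? library "|").getD [])) none (some 2))
  let updated_libraries := list_libraries.foldl
    (fun acc lib => if PySem.Str.startswith lib group_artifact then acc ++ [lib] else acc) []
  if updated_libraries.length = 0 then
    -- split("|") is never empty, so Python's parts[0] never raises; .getD "" is unreachable
    let group := (PySem.List.pyGet? (((PySem.Str.split? library "|").getD [])) 0).getD ""
    list_libraries.foldl
      (fun acc lib => if PySem.Str.startswith lib group then acc ++ [lib] else acc) []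
  else updated_libraries

-- ===== PORT B =====
def found_match_update_alt (library : String) (list_libraries : List String) : List String :=
  let parts := ((PySem.Str.split? library "|").getD [])
  let group_artifact := PySem.Str.join "|" (PySem.List.slice parts none (some 2))
  let group := (PySem.List.pyGet? parts 0).getD ""
  let pf := list_libraries.foldl
    (fun pf lib =>
      (if PySem.Str.startswith lib group_artifact then pf.1 ++ [lib] else pf.1,
       if PySem.Str.startswith lib group then pf.2 ++ [lib] else pf.2))
    ([], [])
  if pf.1.isEmpty then pf.2 else pf.1

-- ===== PRECONDITION & SPEC =====
def Spec_found_match_update (library : String) (list_libraries : List String) (out : List String) : Prop := out = found_match_update_alt library list_libraries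
instance (library : String) (list_libraries : List String) (out : List String) : Decidable (Spec_found_match_update library list_libraries out) := by unfold Spec_found_match_update; infer_instance

-- ===== CLAIM (what is proved, stated in full; the proofs are below) =====
def Claim_equal_found_match_update : Prop := ∀ (library : String) (list_libraries : List String), Dom_found_match_update library list_libraries → Spec_found_match_update library list_libraries (found_match_update library list_libraries)

-- ===== LEMMAS AND PROOFS =====

-- B's paired fold computes both of A's folds at once.
theorem pair_foldl (ga g : String) (xs : List String) (a b : List String) :
    xs.foldl
      (fun pf lib =>
        (if PySem.Str.startswith lib ga then pf.1 ++ [lib] else pf.1,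
         if PySem.Str.startswith lib g then pf.2 ++ [lib] else pf.2))
      (a, b)
    = (xs.foldl (fun acc lib => if PySem.Str.startswith lib ga then acc ++ [lib] else acc) a,
       xs.foldl (fun acc lib => if PySem.Str.startswith lib g then acc ++ [lib] else acc) b) := by
  induction xs generalizing a b with
  | nil => rfl
  | cons x xs ih => simp only [List.foldl_cons]; rw [ih]

-- ===== VERDICT (by name: the statement is the Claim_ definition above) =====
theorem found_match_update_spec : Claim_equal_found_match_update := by
  intro library list_libraries _
  unfold Spec_found_match_update
  simp only [found_match_update, found_match_update_alt, pair_foldl]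
  simp
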